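-- pv_equiv track=rewrite | github.com/Corina2003/Python_Samson_Corina_3A5 | Lab3/Ex9.py | find_blocked_spectators
-- ===== SOURCE A (Python) =====
-- def find_blocked_spectators(matrix):
--     blocked_spectators = []
--
--     for row in range(1, len(matrix)):
--         for col in range(len(matrix[0])):
--             current_height = matrix[row][col]
--             blocked = False
--             for previous_row in range(row):
--                 if matrix[previous_row][col] >= current_height:
--                     blocked = True
--             if blocked:
--                 blocked_spectators.append((row, col))
--
--     return blocked_spectators
-- ===== SOURCE B (Python) =====
-- def find_blocked_spectators(matrix):
--     if not matrix:
--         return []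
--     blocked = []
--     maxima = list(matrix[0])
--     for r in range(1, len(matrix)):
--         row = matrix[r]
--         new_maxima = []
--         for c, m in enumerate(maxima):
--             h = row[c]
--             if m >= h:
--                 blocked.append((r, c))
--             new_maxima.append(m if m >= h else h)
--         maxima = new_maxima
--     return blocked
-- ===== Notes on version B (the rewrite author's own statement) =====
-- stated objective: faster
-- what changed: Replaced the inner rescan of all previous rows per cell by a running per-column maximum maintained in one top-down pass, turning O(R^2*C) into O(R*C).
import Mathlib
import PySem

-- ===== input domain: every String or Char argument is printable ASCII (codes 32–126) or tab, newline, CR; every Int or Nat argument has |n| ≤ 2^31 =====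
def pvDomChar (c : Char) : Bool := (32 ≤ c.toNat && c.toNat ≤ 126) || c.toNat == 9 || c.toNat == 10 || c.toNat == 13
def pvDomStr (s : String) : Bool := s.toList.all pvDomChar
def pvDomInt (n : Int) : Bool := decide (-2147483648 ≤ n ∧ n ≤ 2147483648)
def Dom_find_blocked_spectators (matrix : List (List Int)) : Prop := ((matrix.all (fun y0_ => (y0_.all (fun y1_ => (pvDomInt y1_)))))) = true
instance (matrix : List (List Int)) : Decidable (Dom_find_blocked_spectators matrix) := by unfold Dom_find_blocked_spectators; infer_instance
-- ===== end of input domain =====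

-- B replaces A's per-cell rescan of all previous rows by a running per-column maximum
-- maintained in one top-down pass (same output order, asymptotically fewer cell reads).

-- ===== PORT A =====
def find_blocked_spectators (matrix : List (List Int)) : List (Int × Int) :=
  (PySem.List.pyRange 1 (PySem.List.len matrix) 1).foldl (fun bs row =>
    (PySem.List.pyRange 0 (PySem.List.len (PySem.List.pyGetD matrix 0 [])) 1).foldl (fun bs col =>
      let current := PySem.List.pyGetD (PySem.List.pyGetD matrix row []) col 0
      let blocked := (PySem.List.pyRange 0 row 1).foldl (fun b pr =>
        if PySem.List.pyGetD (PySem.List.pyGetD matrix pr []) col 0 ≥ current then true else b) false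
      if blocked then bs ++ [(row, col)] else bs) bs) []

-- ===== PORT B =====
def find_blocked_spectators_alt (matrix : List (List Int)) : List (Int × Int) :=
  match matrix with
  | [] => []
  | first :: _ =>
    ((PySem.List.pyRange 1 (PySem.List.len matrix) 1).foldl
      (fun (st : List (Int × Int) × List Int) r =>
        let row := PySem.List.pyGetD matrix r []
        (PySem.List.enumerate st.2).foldl
          (fun (st2 : List (Int × Int) × List Int) cm =>
            let h := PySem.List.pyGetD row cm.1 0
            (if cm.2 ≥ h then st2.1 ++ [(r, cm.1)] else st2.1,
             st2.2 ++ [if cm.2 ≥ h then cm.2 else h]))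
          (st.1, []))
      ([], first)).1

-- ===== PRECONDITION & SPEC =====
-- Pre_ excludes exactly the ragged matrices on which Python A raises IndexError:
-- some row after the first is shorter than row 0 (both A and B raise there).
def Pre_find_blocked_spectators (matrix : List (List Int)) : Prop :=
  ∀ row ∈ matrix.tail, (matrix.headD []).length ≤ row.length
instance (matrix : List (List Int)) : Decidable (Pre_find_blocked_spectators matrix) := by
  unfold Pre_find_blocked_spectators; infer_instance

def pvWitness_find_blocked_spectators : List (List Int) := [[1, 2], [3, 0], [2, 5]]

def Spec_find_blocked_spectators (matrix : List (List Int)) (out : List (Int × Int)) : Prop := out = find_blocked_spectators_alt matrix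
instance (matrix : List (List Int)) (out : List (Int × Int)) : Decidable (Spec_find_blocked_spectators matrix out) := by unfold Spec_find_blocked_spectators; infer_instance

-- ===== CLAIM (what is proved, stated in full; the proofs are below) =====
def Claim_equal_find_blocked_spectators : Prop := ∀ (matrix : List (List Int)), Dom_find_blocked_spectators matrix → Pre_find_blocked_spectators matrix → Spec_find_blocked_spectators matrix (find_blocked_spectators matrix)

-- ===== LEMMAS AND PROOFS =====

-- matrix[i][c] with defaults (both ports only read in-range cells under Pre_,
-- and even out of range both read the same defaulted value).
def pvGeti (matrix : List (List Int)) (i c : Int) : Int :=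
  PySem.List.pyGetD (PySem.List.pyGetD matrix i []) c 0

-- running maximum of column c over rows 0..k
def pvCmax (matrix : List (List Int)) (c : Int) : Nat → Int
  | 0 => pvGeti matrix 0 c
  | k+1 => if pvCmax matrix c k ≥ pvGeti matrix ((k : Int) + 1) c then pvCmax matrix c k
           else pvGeti matrix ((k : Int) + 1) c

theorem pvCmax_ge_iff (matrix : List (List Int)) (c h : Int) (k : Nat) :
    h ≤ pvCmax matrix c k ↔ ∃ j : Nat, j ≤ k ∧ h ≤ pvGeti matrix (j : Int) c := by
  induction k with
  | zero =>
    constructor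
    · intro hh; exact ⟨0, le_refl 0, hh⟩
    · rintro ⟨j, hj, hh⟩
      have : j = 0 := Nat.le_zero.mp hj
      subst this; exact hh
  | succ k ih =>
    simp only [pvCmax]
    split_ifs with hc
    · rw [ih]
      constructor
      · rintro ⟨j, hj, hh⟩; exact ⟨j, Nat.le_succ_of_le hj, hh⟩
      · rintro ⟨j, hj, hh⟩
        rcases Nat.lt_succ_iff_lt_or_eq.mp (Nat.lt_succ_of_le hj) with h1 | h1
        · exact ⟨j, Nat.lt_succ_iff.mp h1, hh⟩
        · subst h1
          push_cast at hh
          exact ih.mp (le_trans hh (ge_iff_le.mp hc))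
    · rw [not_le] at hc
      constructor
      · intro hh
        exact ⟨k + 1, le_refl _, by push_cast; exact hh⟩
      · rintro ⟨j, hj, hh⟩
        rcases Nat.lt_succ_iff_lt_or_eq.mp (Nat.lt_succ_of_le hj) with h1 | h1
        · have := ih.mpr ⟨j, Nat.lt_succ_iff.mp h1, hh⟩
          exact le_trans this (le_of_lt hc)
        · subst h1; push_cast at hh ⊢; exact hh


-- 'blocked = False; for pr in range(row): if cond: blocked = True' as an any
theorem pvFoldOr (p : Int → Prop) [DecidablePred p] (l : List Int) (b : Bool) :
    l.foldl (fun ok x => if p x then true else ok) b = (b || l.any fun x => decide (p x)) := by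
  induction l generalizing b with
  | nil => simp
  | cons x xs ih =>
    simp only [List.foldl_cons, List.any_cons, ih]
    by_cases hp : p x <;> simp [hp]

-- A's inner blocked test equals the running-maximum test
theorem pvAblk_iff (matrix : List (List Int)) (c h r : Int) (hr : 1 ≤ r) :
    ((PySem.List.pyRange 0 r 1).any (fun pr => decide (h ≤ pvGeti matrix pr c)) = true)
      ↔ h ≤ pvCmax matrix c (r - 1).toNat := by
  rw [List.any_eq_true, pvCmax_ge_iff]
  constructor
  · rintro ⟨pr, hmem, hh⟩
    rw [PySem.List.mem_pyRange_one] at hmem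
    refine ⟨pr.toNat, by omega, ?_⟩
    rw [Int.toNat_of_nonneg hmem.1]
    exact of_decide_eq_true hh
  · rintro ⟨j, hj, hh⟩
    refine ⟨(j : Int), ?_, decide_eq_true hh⟩
    rw [PySem.List.mem_pyRange_one]
    omega

-- the canonical per-row step both ports reduce to
def pvStep (matrix : List (List Int)) (m : Int) (bs : List (Int × Int)) (r : Int) : List (Int × Int) :=
  bs ++ ((PySem.List.pyRange 0 m 1).filter
          (fun c => decide (pvGeti matrix r c ≤ pvCmax matrix c (r - 1).toNat))).map (fun c => (r, c))

theorem pvA_canon (matrix : List (List Int)) :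
    find_blocked_spectators matrix
      = (PySem.List.pyRange 1 (PySem.List.len matrix) 1).foldl
          (pvStep matrix (PySem.List.len (PySem.List.pyGetD matrix 0 []))) [] := by
  unfold find_blocked_spectators
  refine PySem.List.foldl_congr_mem _ _ _ _ ?_
  intro bs r hr
  rw [PySem.List.mem_pyRange_one] at hr
  have hbody : (fun (bs : List (Int × Int)) (col : Int) =>
      let current := PySem.List.pyGetD (PySem.List.pyGetD matrix r []) col 0
      let blocked := (PySem.List.pyRange 0 r 1).foldl (fun b pr =>
        if PySem.List.pyGetD (PySem.List.pyGetD matrix pr []) col 0 ≥ current then true else b) false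
      if blocked then bs ++ [(r, col)] else bs)
      = (fun bs col => if ((PySem.List.pyRange 0 r 1).any
            (fun pr => decide (pvGeti matrix r col ≤ pvGeti matrix pr col))) then bs ++ [(r, col)] else bs) := by
    funext bs col
    simp only [pvGeti]
    rw [pvFoldOr (fun pr => PySem.List.pyGetD (PySem.List.pyGetD matrix pr []) col 0
          ≥ PySem.List.pyGetD (PySem.List.pyGetD matrix r []) col 0) (PySem.List.pyRange 0 r 1) false]
    rw [Bool.false_or]
    rfl
  rw [hbody, PySem.List.foldl_append_if]
  unfold pvStep
  congr 1
  congr 1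
  apply List.filter_congr
  intro c _
  rw [← Bool.coe_iff_coe, decide_eq_true_eq]
  exact pvAblk_iff matrix c (pvGeti matrix r c) r hr.1

-- canonical form of B's per-row step: updated blocked list and new column maxima
def pvBStep (matrix : List (List Int)) (st : List (Int × Int) × List Int) (r : Int) :
    List (Int × Int) × List Int :=
  (st.1 ++ ((PySem.List.pyRange 0 (PySem.List.len st.2) 1).filter
       (fun c => decide (PySem.List.pyGetD (PySem.List.pyGetD matrix r []) c 0
                   ≤ PySem.List.pyGetD st.2 c 0))).map (fun c => (r, c)),
   (PySem.List.pyRange 0 (PySem.List.len st.2) 1).map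
       (fun c => if PySem.List.pyGetD st.2 c 0 ≥ PySem.List.pyGetD (PySem.List.pyGetD matrix r []) c 0
                 then PySem.List.pyGetD st.2 c 0
                 else PySem.List.pyGetD (PySem.List.pyGetD matrix r []) c 0))

theorem pvB_step_eq (matrix : List (List Int)) :
    (fun (st : List (Int × Int) × List Int) (r : Int) =>
       let row := PySem.List.pyGetD matrix r []
       (PySem.List.enumerate st.2).foldl
         (fun (st2 : List (Int × Int) × List Int) cm =>
           let h := PySem.List.pyGetD row cm.1 0
           (if cm.2 ≥ h then st2.1 ++ [(r, cm.1)] else st2.1,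
            st2.2 ++ [if cm.2 ≥ h then cm.2 else h]))
         (st.1, []))
    = pvBStep matrix := by
  funext st r
  show (PySem.List.enumerate st.2).foldl _ (st.1, ([] : List Int)) = _
  rw [PySem.List.enumerate_eq_map_pyRange st.2 0, List.foldl_map]
  rw [PySem.List.foldl_prod_mk
        (fun (a : List (Int × Int)) (j : Int) =>
          if PySem.List.pyGetD st.2 j 0 ≥ PySem.List.pyGetD (PySem.List.pyGetD matrix r []) j 0
          then a ++ [(r, j)] else a)
        (fun (b : List Int) (j : Int) =>
          b ++ [if PySem.List.pyGetD st.2 j 0 ≥ PySem.List.pyGetD (PySem.List.pyGetD matrix r []) j 0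
                then PySem.List.pyGetD st.2 j 0
                else PySem.List.pyGetD (PySem.List.pyGetD matrix r []) j 0])]
  unfold pvBStep
  rw [PySem.List.foldl_append_ite, PySem.List.foldl_append_singleton_eq_map]
  rfl

theorem pvB_inv (first : List Int) (rest : List (List Int)) (k : Nat) :
    (PySem.List.pyRange 1 (1 + (k : Int)) 1).foldl (pvBStep (first :: rest)) ([], first)
      = ((PySem.List.pyRange 1 (1 + (k : Int)) 1).foldl
            (pvStep (first :: rest) (PySem.List.len first)) [],
         (PySem.List.pyRange 0 (PySem.List.len first) 1).map
            (fun c => pvCmax (first :: rest) c k)) := by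
  induction k with
  | zero =>
    rw [show ((1 : Int) + (0 : Nat)) = 1 by norm_num]
    rw [PySem.List.pyRange_one_eq_nil (le_refl 1)]
    simp only [List.foldl_nil]
    congr 1
    have : (fun c => pvCmax (first :: rest) c 0)
        = (fun c => PySem.List.pyGetD first c 0) := by
      funext c
      simp [pvCmax, pvGeti, PySem.List.pyGetD_zero_cons]
    rw [this, PySem.List.map_pyGetD_pyRange_zero]
  | succ k ih =>
    have hc : ((1 : Int) + ((k + 1 : Nat) : Int)) = (1 + (k : Int)) + 1 := by push_cast; ring
    rw [hc, PySem.List.pyRange_one_succ_right (by omega : (1 : Int) ≤ 1 + (k : Int))]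
    rw [List.foldl_append, List.foldl_append, ih]
    simp only [List.foldl_cons, List.foldl_nil]
    have hlen : PySem.List.len ((PySem.List.pyRange 0 (PySem.List.len first) 1).map
        (fun c => pvCmax (first :: rest) c k)) = PySem.List.len first := by
      simp [PySem.List.len, PySem.List.length_pyRange_one]
    have hget : ∀ c ∈ PySem.List.pyRange 0 (PySem.List.len first) 1,
        PySem.List.pyGetD ((PySem.List.pyRange 0 (PySem.List.len first) 1).map
          (fun c => pvCmax (first :: rest) c k)) c 0 = pvCmax (first :: rest) c k := by
      intro c hcm
      rw [PySem.List.mem_pyRange_one] at hcm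
      exact PySem.List.pyGetD_map_pyRange_of_nonneg _ _ _ _ hcm.1 hcm.2
    unfold pvBStep
    dsimp only
    rw [hlen]
    refine Prod.ext ?_ ?_
    · dsimp only
      show _ = pvStep (first :: rest) (PySem.List.len first) _ (1 + (k : Int))
      unfold pvStep
      congr 1
      congr 1
      apply List.filter_congr
      intro c hcm
      rw [hget c hcm]
      have ht : ((1 : Int) + (k : Int) - 1).toNat = k := by omega
      rw [ht]
      rfl
    · dsimp only
      apply List.map_congr_left
      intro c hcm
      rw [hget c hcm]
      show _ = pvCmax (first :: rest) c (k + 1)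
      simp only [pvCmax]
      rw [show ((k : Int) + 1) = 1 + (k : Int) by ring]
      rfl

-- ===== VERDICT (by name: the statement is the Claim_ definition above) =====
theorem find_blocked_spectators_spec : Claim_equal_find_blocked_spectators := by
  unfold Claim_equal_find_blocked_spectators
  intro matrix _ _
  unfold Spec_find_blocked_spectators
  cases matrix with
  | nil => rfl
  | cons first rest =>
    rw [pvA_canon]
    have halt : find_blocked_spectators_alt (first :: rest)
        = ((PySem.List.pyRange 1 (PySem.List.len (first :: rest)) 1).foldl
            (fun (st : List (Int × Int) × List Int) r =>
              let row := PySem.List.pyGetD (first :: rest) r []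
              (PySem.List.enumerate st.2).foldl
                (fun (st2 : List (Int × Int) × List Int) cm =>
                  let h := PySem.List.pyGetD row cm.1 0
                  (if cm.2 ≥ h then st2.1 ++ [(r, cm.1)] else st2.1,
                   st2.2 ++ [if cm.2 ≥ h then cm.2 else h]))
                (st.1, [])) ([], first)).1 := rfl
    rw [halt, pvB_step_eq]
    have hn : PySem.List.len (first :: rest) = 1 + (rest.length : Int) := by
      simp [PySem.List.len]
      ring
    rw [hn, pvB_inv first rest rest.length]
    rw [PySem.List.pyGetD_zero_cons]
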